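-- pv_equiv track=rewrite | github.com/baxxos/Scanpath-Evaluator | src/scanpathAlgs/dotplot.py | findLongestCommonSequence
-- ===== SOURCE A (Python) =====
-- def findLongestCommonSequence(dotplotMatrix, sequenceX):
--
--     commonSubSequence = ""
--     lengthSubsequence = 0
--
--     # right part of matrix
--     for i in range(0, len(dotplotMatrix[0])):
--         # reamining x length or height of matrix
--         sum = 0
--         for j in range(0, min(len(dotplotMatrix[0]) - i, len(dotplotMatrix))):
--             sum += dotplotMatrix[j][i + j]
--
--         if sum > lengthSubsequence:
--             # sequence created by characters with value 1
--             lengthSubsequence = sum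
--             commonSubSequence = ""
--             for j in range(0, min(len(dotplotMatrix[0]) - i, len(dotplotMatrix))):
--                 if dotplotMatrix[j][i + j] == 1:
--                     commonSubSequence = commonSubSequence + sequenceX[i + j]
--
--
--     # left part of the matrix
--     for i in range(0, len(dotplotMatrix)):
--         sum = 0
--         for j in range(0, min(len(dotplotMatrix) - i, len(dotplotMatrix[0]))):
--             sum += dotplotMatrix[i + j][j]
--
--         if sum > lengthSubsequence:
--             # sequence created by characters with value 1
--             lengthSubsequence = sum
--             commonSubSequence = ""
--             for j in range(0, min(len(dotplotMatrix) - i, len(dotplotMatrix[0]))):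
--                 if dotplotMatrix[i + j][j] == 1:
--                     commonSubSequence = commonSubSequence + sequenceX[j]
--
--     return commonSubSequence
-- ===== SOURCE B (Python) =====
-- def findLongestCommonSequence(dotplotMatrix, sequenceX):
--     rows = len(dotplotMatrix)
--     cols = len(dotplotMatrix[0])
--     # One pass over the matrix: bucket every cell by its diagonal key d = c - r,
--     # keeping per diagonal the running sum and the string of characters at 1-cells.
--     diag = {}
--     for r, row in enumerate(dotplotMatrix):
--         for c in range(cols):
--             v = row[c]
--             s, chars = diag.get(c - r, (0, ""))
--             if v == 1:
--                 chars = chars + sequenceX[c]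
--             diag[c - r] = (s + v, chars)
--     # Consider diagonals in the original order: d = 0..cols-1, then d = -1..-(rows-1),
--     # keeping the first strict improvement.
--     best, bestLen = "", 0
--     for d in list(range(0, cols)) + list(range(-1, -rows, -1)):
--         s, chars = diag.get(d, (0, ""))
--         if s > bestLen:
--             best, bestLen = chars, s
--     return best
-- ===== Notes on version B (the rewrite author's own statement) =====
-- stated objective: alternative
-- what changed: Replaces A's two per-diagonal loop nests (one loop per diagonal, plus a re-scan of the winning diagonal to rebuild its string) by a single row-major pass that buckets every cell into a dict keyed by d = c - r, accumulating per diagonal both the sum and the character string, followed by one selection scan over the diagonal keys in A's consideration order.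
-- outside the precondition, e.g. on findLongestCommonSequence([[1, 1], [0, 0]], 'a'): A returns 'a', B raises IndexError
import Mathlib
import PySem

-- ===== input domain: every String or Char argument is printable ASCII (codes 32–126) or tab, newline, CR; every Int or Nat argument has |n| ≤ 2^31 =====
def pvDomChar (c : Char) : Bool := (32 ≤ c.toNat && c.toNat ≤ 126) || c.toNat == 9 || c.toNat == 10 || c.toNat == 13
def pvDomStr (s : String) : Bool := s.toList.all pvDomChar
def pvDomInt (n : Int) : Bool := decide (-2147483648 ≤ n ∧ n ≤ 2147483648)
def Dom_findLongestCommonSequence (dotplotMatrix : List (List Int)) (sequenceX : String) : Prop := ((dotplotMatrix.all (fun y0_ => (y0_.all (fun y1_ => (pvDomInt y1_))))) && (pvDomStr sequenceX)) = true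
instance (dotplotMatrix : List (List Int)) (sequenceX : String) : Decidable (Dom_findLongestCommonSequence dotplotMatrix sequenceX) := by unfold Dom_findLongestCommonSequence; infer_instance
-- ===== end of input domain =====

-- B replaces A's per-diagonal loop nests by one row-major pass bucketing cells into a dict keyed
-- by d = c - r, then a single selection scan over the diagonal keys in A's order (objective: alternative).

-- ===== PORT A =====
-- shared cell / character accessors (dotplotMatrix[r][c] and sequenceX[c] as a 1-char string)
def pvCell (m : List (List Int)) (r c : Int) : Int :=
  PySem.List.pyGetD (PySem.List.pyGetD m r []) c 0

def pvCharAt (seq : String) (c : Int) : String :=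
  ((PySem.Str.pyGet? seq c).map Char.toString).getD ""

def findLongestCommonSequence (dotplotMatrix : List (List Int)) (sequenceX : String) : String :=
  let cols : Int := ((dotplotMatrix.headD []).length : Int)   -- len(dotplotMatrix[0]); raises on [] (outside Pre_)
  let rows : Int := (dotplotMatrix.length : Int)
  -- right part of matrix
  let st1 : String × Int :=
    (PySem.List.pyRange 0 cols 1).foldl (fun st i =>
      let s := (PySem.List.pyRange 0 (min (cols - i) rows) 1).foldl
        (fun s j => s + pvCell dotplotMatrix j (i + j)) 0
      if s > st.2 then
        ((PySem.List.pyRange 0 (min (cols - i) rows) 1).foldl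
          (fun acc j => if pvCell dotplotMatrix j (i + j) == 1 then acc ++ pvCharAt sequenceX (i + j) else acc) "", s)
      else st) ("", 0)
  -- left part of the matrix
  let st2 : String × Int :=
    (PySem.List.pyRange 0 rows 1).foldl (fun st i =>
      let s := (PySem.List.pyRange 0 (min (rows - i) cols) 1).foldl
        (fun s j => s + pvCell dotplotMatrix (i + j) j) 0
      if s > st.2 then
        ((PySem.List.pyRange 0 (min (rows - i) cols) 1).foldl
          (fun acc j => if pvCell dotplotMatrix (i + j) j == 1 then acc ++ pvCharAt sequenceX j else acc) "", s)
      else st) st1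
  st2.1

-- ===== PORT B =====
def findLongestCommonSequence_alt (dotplotMatrix : List (List Int)) (sequenceX : String) : String :=
  let rows : Int := (dotplotMatrix.length : Int)
  let cols : Int := ((dotplotMatrix.headD []).length : Int)
  -- one pass: bucket every cell by its diagonal key d = c - r
  let diag : PySem.Dict Int (Int × String) :=
    (PySem.List.enumerate dotplotMatrix 0).foldl (fun D p =>
      (PySem.List.pyRange 0 cols 1).foldl (fun D c =>
        let v := PySem.List.pyGetD p.2 c 0
        let q := D.getD (c - p.1) (0, "")
        D.insert (c - p.1) (q.1 + v, if v == 1 then q.2 ++ pvCharAt sequenceX c else q.2)) D)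
      PySem.Dict.empty
  -- selection scan over the diagonal keys in A's consideration order
  let sel : String × Int :=
    ((PySem.List.pyRange 0 cols 1) ++ (PySem.List.pyRange (-1) (-rows) (-1))).foldl
      (fun st d =>
        let q := diag.getD d (0, "")
        if q.1 > st.2 then (q.2, q.1) else st) ("", 0)
  sel.1

-- ===== PRECONDITION & SPEC =====
-- Pre_ excludes the empty matrix and rows shorter than the first row (A raises IndexError there),
-- and matrices with a 1-cell in a column at or beyond the end of sequenceX (B reads sequenceX at
-- every 1-cell and raises IndexError there, while A reads it only on winning diagonals and may
-- return a value instead).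
def Pre_findLongestCommonSequence (dotplotMatrix : List (List Int)) (sequenceX : String) : Prop :=
  dotplotMatrix ≠ [] ∧
  (∀ row ∈ dotplotMatrix, (dotplotMatrix.headD []).length ≤ row.length) ∧
  (∀ row ∈ dotplotMatrix, ∀ c ∈ List.range (dotplotMatrix.headD []).length,
    PySem.Str.len sequenceX ≤ (c : Int) → row.getD c 0 ≠ 1)

instance (dotplotMatrix : List (List Int)) (sequenceX : String) : Decidable (Pre_findLongestCommonSequence dotplotMatrix sequenceX) := by
  unfold Pre_findLongestCommonSequence; infer_instance

def pvWitness_findLongestCommonSequence : List (List Int) × String := ([[1, 0], [0, 1]], "ab")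

def Spec_findLongestCommonSequence (dotplotMatrix : List (List Int)) (sequenceX : String) (out : String) : Prop := out = findLongestCommonSequence_alt dotplotMatrix sequenceX
instance (dotplotMatrix : List (List Int)) (sequenceX : String) (out : String) : Decidable (Spec_findLongestCommonSequence dotplotMatrix sequenceX out) := by unfold Spec_findLongestCommonSequence; infer_instance

-- ===== CLAIM (what is proved, stated in full; the proofs are below) =====
def Claim_equal_findLongestCommonSequence : Prop := ∀ (dotplotMatrix : List (List Int)) (sequenceX : String), Dom_findLongestCommonSequence dotplotMatrix sequenceX → Pre_findLongestCommonSequence dotplotMatrix sequenceX → Spec_findLongestCommonSequence dotplotMatrix sequenceX (findLongestCommonSequence dotplotMatrix sequenceX)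

-- ===== LEMMAS AND PROOFS =====

-- canonical per-diagonal accumulator: pvUpd folds one cell (column c, value v) into (sum, chars)
def pvUpd (seq : String) (c v : Int) (q : Int × String) : Int × String :=
  (q.1 + v, if v == 1 then q.2 ++ pvCharAt seq c else q.2)

-- walk the rows from row index r, folding the cell of diagonal d (if it exists) of each row
def pvEff (seq : String) (cols d : Int) : List (List Int) → Int → (Int × String) → Int × String
  | [], _, q => q
  | row :: rest, r, q =>
      pvEff seq cols d rest (r + 1)
        (if 0 ≤ r + d ∧ r + d < cols then pvUpd seq (r + d) (PySem.List.pyGetD row (r + d) 0) q else q)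

-- the (sum, chars) pair of diagonal d of the whole matrix
def pvCand (m : List (List Int)) (seq : String) (d : Int) : Int × String :=
  pvEff seq ((m.headD []).length : Int) d m 0 (0, "")

def pvSel (st : String × Int) (q : Int × String) : String × Int :=
  if q.1 > st.2 then (q.2, q.1) else st

theorem pvEff_ge (seq : String) (cols d : Int) :
    ∀ (L : List (List Int)) (r : Int) (q : Int × String), cols ≤ r + d →
      pvEff seq cols d L r q = q := by
  intro L
  induction L with
  | nil => intro r q _; rfl
  | cons row rest ih =>
      intro r q h
      simp only [pvEff]
      rw [if_neg (by omega), ih (r + 1) q (by omega)]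

theorem pvEff_skip (seq : String) (cols d : Int) :
    ∀ (j : Nat) (L : List (List Int)) (r : Int) (q : Int × String), r + j + d ≤ 0 →
      pvEff seq cols d L r q = pvEff seq cols d (L.drop j) (r + j) q := by
  intro j
  induction j with
  | zero => intro L r q _; simp
  | succ n ih =>
      intro L r q h
      cases L with
      | nil => simp [pvEff]
      | cons row rest =>
          simp only [pvEff, List.drop_succ_cons]
          rw [if_neg (by push_cast at h ⊢; omega)]
          rw [ih rest (r + 1) q (by push_cast at h ⊢; omega)]
          congr 1
          push_cast
          ring

theorem pvEff_closed (seq : String) (cols d : Int) :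
    ∀ (L : List (List Int)) (r : Int) (q : Int × String), 0 ≤ r → 0 ≤ r + d →
      pvEff seq cols d L r q =
        (List.range (min ((cols - d - r).toNat) L.length)).foldl
          (fun q (k : Nat) => pvUpd seq (r + (k : Int) + d) (PySem.List.pyGetD (L.getD k []) (r + (k : Int) + d) 0) q) q := by
  intro L
  induction L with
  | nil => intro r q _ _; simp [pvEff]
  | cons row rest ih =>
      intro r q hr hrd
      simp only [pvEff]
      by_cases h : cols ≤ r + d
      · rw [if_neg (by omega), pvEff_ge seq cols d rest (r + 1) q (by omega)]
        have : min ((cols - d - r).toNat) (row :: rest).length = 0 := by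
          simp only [List.length_cons]; omega
        rw [this]
        simp
      · rw [if_pos (by omega)]
        rw [ih (r + 1) _ (by omega) (by omega)]
        have hN : min ((cols - d - r).toNat) (row :: rest).length
            = min ((cols - d - (r + 1)).toNat) rest.length + 1 := by
          simp only [List.length_cons]; omega
        rw [hN, List.range_succ_eq_map, List.foldl_cons, List.foldl_map]
        have hz : r + ((0 : Nat) : Int) + d = r + d := by push_cast; ring
        rw [show (List.getD (row :: rest) 0 []) = row from rfl]
        rw [hz]
        congr 1
        funext q' k
        have hk : r + ((k + 1 : Nat) : Int) + d = r + 1 + (k : Int) + d := by push_cast; ring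
        rw [List.getD_cons_succ, hk]

-- the B-side dict build: effect of one row's inner loop on the bucket of diagonal d
theorem pvInnerRow (seq : String) (cols : Int) (row : List Int) (rI d : Int) :
    ∀ (a : Int) (D : PySem.Dict Int (Int × String)),
      (((PySem.List.pyRange a cols 1).foldl
          (fun D c => D.insert (c - rI) (pvUpd seq c (PySem.List.pyGetD row c 0) (D.getD (c - rI) (0, "")))) D).getD d (0, ""))
        = if a ≤ rI + d ∧ rI + d < cols then
            pvUpd seq (rI + d) (PySem.List.pyGetD row (rI + d) 0) (D.getD d (0, ""))
          else D.getD d (0, "") := by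
  suffices H : ∀ (n : Nat) (a : Int) (D : PySem.Dict Int (Int × String)), (cols - a).toNat = n →
      (((PySem.List.pyRange a cols 1).foldl
          (fun D c => D.insert (c - rI) (pvUpd seq c (PySem.List.pyGetD row c 0) (D.getD (c - rI) (0, "")))) D).getD d (0, ""))
        = if a ≤ rI + d ∧ rI + d < cols then
            pvUpd seq (rI + d) (PySem.List.pyGetD row (rI + d) 0) (D.getD d (0, ""))
          else D.getD d (0, "") by
    intro a D; exact H ((cols - a).toNat) a D rfl
  intro n
  induction n with
  | zero =>
      intro a D hn
      rw [PySem.List.pyRange_one_eq_nil (by omega), List.foldl_nil, if_neg (by omega)]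
  | succ n ih =>
      intro a D hn
      rw [PySem.List.pyRange_one_cons (by omega), List.foldl_cons]
      rw [ih (a + 1) _ (by omega)]
      by_cases hcase : rI + d = a
      · rw [if_neg (by omega), if_pos (by constructor <;> omega)]
        have hd : d = a - rI := by omega
        subst hd
        rw [PySem.Dict.getD_insert_self]
        rw [show rI + (a - rI) = a by ring]
      · by_cases h2 : a + 1 ≤ rI + d ∧ rI + d < cols
        · rw [if_pos h2, if_pos (by omega)]
          rw [PySem.Dict.getD_insert_of_ne D _ _ (by omega)]
        · rw [if_neg h2, if_neg (by omega)]
          rw [PySem.Dict.getD_insert_of_ne D _ _ (by omega)]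

-- the B-side dict build: the final bucket of diagonal d is pvEff
theorem pvBuild (seq : String) (cols d : Int) :
    ∀ (L : List (List Int)) (s : Int) (D : PySem.Dict Int (Int × String)),
      ((PySem.List.enumerate L s).foldl (fun D p =>
          (PySem.List.pyRange 0 cols 1).foldl (fun D c =>
            D.insert (c - p.1) (pvUpd seq c (PySem.List.pyGetD p.2 c 0) (D.getD (c - p.1) (0, "")))) D) D).getD d (0, "")
        = pvEff seq cols d L s (D.getD d (0, "")) := by
  intro L
  induction L with
  | nil => intro s D; simp [PySem.List.enumerate_nil, pvEff]
  | cons row rest ih =>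
      intro s D
      rw [PySem.List.enumerate_cons, List.foldl_cons]
      rw [ih (s + 1)]
      simp only [pvEff]
      congr 1
      exact pvInnerRow seq cols row s d 0 D

theorem pvSel_ge (ds : List Int) (f : Int → Int × String) :
    ∀ (st : String × Int),
      st.2 ≤ (ds.foldl (fun st d => pvSel st (f d)) st).2 ∧
      ∀ d ∈ ds, (f d).1 ≤ (ds.foldl (fun st d => pvSel st (f d)) st).2 := by
  induction ds with
  | nil => intro st; simp
  | cons d0 ds ih =>
      intro st
      simp only [List.foldl_cons, List.mem_cons]
      have hstep : st.2 ≤ (pvSel st (f d0)).2 ∧ (f d0).1 ≤ (pvSel st (f d0)).2 := by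
        unfold pvSel; split_ifs with h
        · exact ⟨le_of_lt h, le_refl _⟩
        · exact ⟨le_refl _, by omega⟩
      refine ⟨le_trans hstep.1 (ih (pvSel st (f d0))).1, ?_⟩
      intro d hd
      rcases hd with rfl | hd
      · exact le_trans hstep.2 (ih _).1
      · exact (ih _).2 d hd

-- A's right-part per-diagonal loops compute pvCand i (for 0 ≤ i)
theorem pvCandR (m : List (List Int)) (seq : String) (i : Int) (h0 : 0 ≤ i) :
    pvCand m seq i =
      ((PySem.List.pyRange 0 (min (((m.headD []).length : Int) - i) (m.length : Int)) 1).foldl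
          (fun s j => s + pvCell m j (i + j)) 0,
       (PySem.List.pyRange 0 (min (((m.headD []).length : Int) - i) (m.length : Int)) 1).foldl
          (fun acc j => if pvCell m j (i + j) == 1 then acc ++ pvCharAt seq (i + j) else acc) "") := by
  rw [pvCand, pvEff_closed seq _ i m 0 (0, "") le_rfl (by omega)]
  simp only [pvUpd]
  rw [PySem.List.foldl_prod_mk
      (f := fun (a : Int) (k : Nat) => a + PySem.List.pyGetD (m.getD k []) (0 + (k : Int) + i) 0)
      (g := fun (b : String) (k : Nat) =>
        if PySem.List.pyGetD (m.getD k []) (0 + (k : Int) + i) 0 == 1 then b ++ pvCharAt seq (0 + (k : Int) + i) else b)]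
  rw [PySem.List.pyRange_one 0 (min (((m.headD []).length : Int) - i) (m.length : Int))]
  simp only [List.foldl_map]
  have hN : min ((((m.headD []).length : Int) - i - 0).toNat) m.length
      = (min (((m.headD []).length : Int) - i) ((m.length : Int)) - 0).toNat := by omega
  rw [hN]
  refine Prod.ext ?_ ?_ <;> simp only
  · congr 1
    funext a k
    simp only [pvCell, zero_add, PySem.List.pyGetD_natCast]
    rw [Int.add_comm i (k : Int)]
  · congr 1
    funext b k
    simp only [pvCell, zero_add, PySem.List.pyGetD_natCast]
    rw [Int.add_comm i (k : Int)]

-- A's left-part per-diagonal loops compute pvCand (-i) (for 0 ≤ i)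
theorem pvCandL (m : List (List Int)) (seq : String) (i : Int) (h0 : 0 ≤ i) :
    pvCand m seq (-i) =
      ((PySem.List.pyRange 0 (min ((m.length : Int) - i) ((m.headD []).length : Int)) 1).foldl
          (fun s j => s + pvCell m (i + j) j) 0,
       (PySem.List.pyRange 0 (min ((m.length : Int) - i) ((m.headD []).length : Int)) 1).foldl
          (fun acc j => if pvCell m (i + j) j == 1 then acc ++ pvCharAt seq j else acc) "") := by
  rw [pvCand]
  rw [pvEff_skip seq _ (-i) i.toNat m 0 (0, "") (by omega)]
  rw [pvEff_closed seq _ (-i) (m.drop i.toNat) (0 + (i.toNat : Int)) (0, "") (by omega) (by omega)]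
  simp only [pvUpd]
  rw [PySem.List.foldl_prod_mk
      (f := fun (a : Int) (k : Nat) =>
        a + PySem.List.pyGetD ((m.drop i.toNat).getD k []) (0 + (i.toNat : Int) + (k : Int) + -i) 0)
      (g := fun (b : String) (k : Nat) =>
        if PySem.List.pyGetD ((m.drop i.toNat).getD k []) (0 + (i.toNat : Int) + (k : Int) + -i) 0 == 1
        then b ++ pvCharAt seq (0 + (i.toNat : Int) + (k : Int) + -i) else b)]
  rw [PySem.List.pyRange_one 0 (min ((m.length : Int) - i) (((m.headD []).length : Int)))]
  simp only [List.foldl_map]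
  have hN : min (((((m.headD []).length : Int)) - -i - (0 + (i.toNat : Int))).toNat) (m.drop i.toNat).length
      = (min ((m.length : Int) - i) (((m.headD []).length : Int)) - 0).toNat := by
    simp only [List.length_drop]; omega
  rw [hN]
  have hcol : ∀ (k : Nat), 0 + (i.toNat : Int) + (k : Int) + -i = (k : Int) := by intro k; omega
  have hrow : ∀ (k : Nat), (m.drop i.toNat).getD k [] = m.getD (i.toNat + k) [] := by
    intro k
    simp [List.getD_eq_getElem?_getD, List.getElem?_drop]
  refine Prod.ext ?_ ?_ <;> simp only
  · congr 1
    funext a k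
    rw [hcol, hrow]
    simp only [pvCell, zero_add]
    have : i + (k : Int) = ((i.toNat + k : Nat) : Int) := by omega
    rw [this]
    simp only [PySem.List.pyGetD_natCast]
  · congr 1
    funext b k
    rw [hcol, hrow]
    simp only [pvCell, zero_add]
    have : i + (k : Int) = ((i.toNat + k : Nat) : Int) := by omega
    rw [this]
    simp only [PySem.List.pyGetD_natCast]

-- the B-side dict build characterization, in the port's literal shape
theorem pvBuildPort (m : List (List Int)) (seq : String) :
    ∀ (d : Int),
      (((PySem.List.enumerate m 0).foldl (fun D p =>
          (PySem.List.pyRange 0 ((m.headD []).length : Int) 1).foldl (fun D c =>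
            D.insert (c - p.1)
              ((D.getD (c - p.1) (0, "")).1 + PySem.List.pyGetD p.2 c 0,
               if PySem.List.pyGetD p.2 c 0 == 1
               then (D.getD (c - p.1) (0, "")).2 ++ pvCharAt seq c
               else (D.getD (c - p.1) (0, "")).2)) D)
        PySem.Dict.empty).getD d (0, ""))
      = pvCand m seq d := by
  intro d
  exact pvBuild seq ((m.headD []).length : Int) d m 0 PySem.Dict.empty

-- the duplicate consideration of diagonal 0 by A's second loop never fires
theorem pvDrop0 (m : List (List Int)) (seq : String) :
    pvSel ((PySem.List.pyRange 0 ((m.headD []).length : Int) 1).foldl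
        (fun st d => pvSel st (pvCand m seq d)) ("", 0)) (pvCand m seq 0)
      = (PySem.List.pyRange 0 ((m.headD []).length : Int) 1).foldl
        (fun st d => pvSel st (pvCand m seq d)) ("", 0) := by
  have hge := pvSel_ge (PySem.List.pyRange 0 ((m.headD []).length : Int) 1) (fun d => pvCand m seq d) ("", 0)
  unfold pvSel
  rw [if_neg]
  simp only [not_lt]
  by_cases hc : (0 : Int) < ((m.headD []).length : Int)
  · exact hge.2 0 (PySem.List.mem_pyRange_one.2 ⟨le_refl 0, hc⟩)
  · have hc0 : ((m.headD []).length : Int) ≤ 0 := by omega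
    have : pvCand m seq 0 = (0, "") := by
      unfold pvCand
      exact pvEff_ge seq _ 0 m 0 (0, "") (by omega)
    rw [this]
    exact le_trans (by norm_num) hge.1

-- A's left loop over i = 1..rows-1 is B's key scan over d = -1..-(rows-1)
theorem pvTail (m : List (List Int)) (seq : String) (st : String × Int) :
    (PySem.List.pyRange 1 (m.length : Int) 1).foldl
        (fun st i => pvSel st (pvCand m seq (-i))) st
      = (PySem.List.pyRange (-1) (-(m.length : Int)) (-1)).foldl
        (fun st d => pvSel st (pvCand m seq d)) st := by
  rw [PySem.List.pyRange_one, PySem.List.pyRange_neg_one]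
  simp only [List.foldl_map]
  rw [show ((-1 : Int) - -(m.length : Int)).toNat = ((m.length : Int) - 1).toNat from by omega]
  congr 1
  funext st' k
  rw [show -((1 : Int) + (k : Int)) = -1 - (k : Int) from by ring]

-- ===== VERDICT (by name: the statement is the Claim_ definition above) =====
theorem findLongestCommonSequence_spec : Claim_equal_findLongestCommonSequence := by
  intro m seq _ hPre
  unfold Spec_findLongestCommonSequence
  obtain ⟨hne, -, -⟩ := hPre
  have hrows : (0 : Int) < (m.length : Int) := by
    cases m with
    | nil => exact absurd rfl hne
    | cons a l => simp
  have H1 : List.foldl (fun (st : String × Int) (i : Int) =>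
        if (PySem.List.pyRange 0 (min (((m.headD []).length : Int) - i) ((m.length : Int))) 1).foldl
            (fun s j => s + pvCell m j (i + j)) 0 > st.2 then
          ((PySem.List.pyRange 0 (min (((m.headD []).length : Int) - i) ((m.length : Int))) 1).foldl
              (fun acc j => if pvCell m j (i + j) == 1 then acc ++ pvCharAt seq (i + j) else acc) "",
           (PySem.List.pyRange 0 (min (((m.headD []).length : Int) - i) ((m.length : Int))) 1).foldl
              (fun s j => s + pvCell m j (i + j)) 0)
        else st) ("", 0) (PySem.List.pyRange 0 ((m.headD []).length : Int) 1)
      = List.foldl (fun st i => pvSel st (pvCand m seq i)) ("", 0)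
          (PySem.List.pyRange 0 ((m.headD []).length : Int) 1) := by
    apply PySem.List.foldl_congr_mem
    intro st i hi
    have h0 : 0 ≤ i := (PySem.List.mem_pyRange_one.1 hi).1
    rw [pvCandR m seq i h0]
    rfl
  have H2 : List.foldl (fun (st : String × Int) (i : Int) =>
        if (PySem.List.pyRange 0 (min ((m.length : Int) - i) (((m.headD []).length : Int))) 1).foldl
            (fun s j => s + pvCell m (i + j) j) 0 > st.2 then
          ((PySem.List.pyRange 0 (min ((m.length : Int) - i) (((m.headD []).length : Int))) 1).foldl
              (fun acc j => if pvCell m (i + j) j == 1 then acc ++ pvCharAt seq j else acc) "",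
           (PySem.List.pyRange 0 (min ((m.length : Int) - i) (((m.headD []).length : Int))) 1).foldl
              (fun s j => s + pvCell m (i + j) j) 0)
        else st)
        (List.foldl (fun st i => pvSel st (pvCand m seq i)) ("", 0)
          (PySem.List.pyRange 0 ((m.headD []).length : Int) 1))
        (PySem.List.pyRange 0 ((m.length : Int)) 1)
      = List.foldl (fun st i => pvSel st (pvCand m seq (-i)))
        (List.foldl (fun st i => pvSel st (pvCand m seq i)) ("", 0)
          (PySem.List.pyRange 0 ((m.headD []).length : Int) 1))
        (PySem.List.pyRange 0 ((m.length : Int)) 1) := by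
    apply PySem.List.foldl_congr_mem
    intro st i hi
    have h0 : 0 ≤ i := (PySem.List.mem_pyRange_one.1 hi).1
    rw [pvCandL m seq i h0]
    rfl
  simp only [findLongestCommonSequence, findLongestCommonSequence_alt]
  refine congrArg Prod.fst ?_
  rw [List.foldl_append]
  rw [H1, H2]
  simp only [pvBuildPort m seq]
  simp only [← pvSel.eq_def]
  rw [PySem.List.pyRange_one_cons hrows, List.foldl_cons]
  simp only [neg_zero, zero_add]
  rw [pvDrop0 m seq]
  exact pvTail m seq _
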